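-- pv_equiv track=rewrite | github.com/zji996/SubFlow | libs/subflow/subflow/export/subtitle_exporter.py | _join_segment_texts
-- ===== SOURCE A (Python) =====
-- def _join_segment_texts(parts: list[str]) -> str:
--     out = ""
--     for part in parts:
--         t = (part or "").strip()
--         if not t:
--             continue
--         if out:
--             prev = out[-1]
--             nxt = t[0]
--             if (
--                 prev.isascii()
--                 and prev.isalnum()
--                 and nxt.isascii()
--                 and nxt.isalnum()
--                 and not out.endswith(" ")
--             ):
--                 out += " "
--         out += t
--     return out
-- ===== SOURCE B (Python) =====
-- def _join_segment_texts(parts: list[str]) -> str: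
--     cleaned = [t for p in parts if (t := (p or "").strip())]
--     pieces = []
--     for t in reversed(cleaned):
--         if pieces and t[-1].isascii() and t[-1].isalnum() and pieces[-1][0].isascii() and pieces[-1][0].isalnum():
--             pieces.append(" ")
--         pieces.append(t)
--     return "".join(reversed(pieces))
-- ===== Notes on version B (the rewrite author's own statement) =====
-- stated objective: alternative
-- what changed: B first builds the cleaned (stripped, non-empty) list, then builds the result back-to-front: it walks the cleaned list in reverse, appending a space before each piece when the part's last char and the first char of the already-placed following piece (pieces[-1][0]) are both ASCII alnum, and finally joins the reversed pieces; A instead grows the output forward and re-inspects the growing string's last char and endswith-space state.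
import Mathlib
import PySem

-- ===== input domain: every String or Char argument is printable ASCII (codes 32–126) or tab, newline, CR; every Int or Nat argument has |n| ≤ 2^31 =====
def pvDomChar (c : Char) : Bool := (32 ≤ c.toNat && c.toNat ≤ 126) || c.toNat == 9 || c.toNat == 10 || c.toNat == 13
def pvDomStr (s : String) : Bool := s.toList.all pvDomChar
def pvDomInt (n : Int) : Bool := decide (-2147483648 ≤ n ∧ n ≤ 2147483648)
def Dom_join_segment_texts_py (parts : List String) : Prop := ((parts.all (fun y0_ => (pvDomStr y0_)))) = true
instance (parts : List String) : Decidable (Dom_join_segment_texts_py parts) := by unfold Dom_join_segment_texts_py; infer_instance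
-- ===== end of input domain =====

-- B cleans the parts once, then builds the result back-to-front over the reversed list,
-- deciding the space from the suffix string's first character; objective: alternative decomposition.

-- ===== PORT A =====
-- c.isascii() and c.isalnum() (the conjunction is exact on the ASCII domain)
def pvAsciiAlnum (c : Char) : Bool := (c.toNat ≤ 127) && PySem.Chars.isalnum c

-- the guard A computes when out is nonempty (out[-1], t[0] via pyGet?)
def pvACond (out t : String) : Bool :=
  match PySem.Str.pyGet? out (-1), PySem.Str.pyGet? t 0 with
  | some prev, some nxt =>
      pvAsciiAlnum prev && pvAsciiAlnum nxt && !(PySem.Str.endswith out " ")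
  | _, _ => false

def pvAStep (out part : String) : String :=
  let t := PySem.Str.strip part
  if t = "" then out
  else if out = "" then out ++ t
  else (if pvACond out t then out ++ " " else out) ++ t

def join_segment_texts_py (parts : List String) : String :=
  parts.foldl pvAStep ""

-- ===== PORT B =====
-- t[-1].isascii() and t[-1].isalnum() and pieces[-1][0].isascii() and pieces[-1][0].isalnum()
def pvBCond (t : String) (pieces : List String) : Bool :=
  match PySem.List.pyGet? pieces (-1) with
  | some last =>
      match PySem.Str.pyGet? t (-1), PySem.Str.pyGet? last 0 with
      | some p, some n => pvAsciiAlnum p && pvAsciiAlnum n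
      | _, _ => false
  | none => false

-- one step of B's loop over reversed(cleaned): maybe a space, then the part
def pvBStep (pieces : List String) (t : String) : List String :=
  (if pieces ≠ [] && pvBCond t pieces then pieces ++ [" "] else pieces) ++ [t]

def join_segment_texts_py_alt (parts : List String) : String :=
  PySem.Str.join ""
    (((((parts.map PySem.Str.strip).filter (fun t => t ≠ "")).reverse).foldl pvBStep []).reverse)

-- ===== PRECONDITION & SPEC =====
def Spec_join_segment_texts_py (parts : List String) (out : String) : Prop := out = join_segment_texts_py_alt parts
instance (parts : List String) (out : String) : Decidable (Spec_join_segment_texts_py parts out) := by unfold Spec_join_segment_texts_py; infer_instance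

-- ===== CLAIM (what is proved, stated in full; the proofs are below) =====
def Claim_equal_join_segment_texts_py : Prop := ∀ (parts : List String), Dom_join_segment_texts_py parts → Spec_join_segment_texts_py parts (join_segment_texts_py parts)

-- ===== LEMMAS AND PROOFS =====

-- the boundary decision as a function of the previous last char and the next part
def pvBnd (lc : Option Char) (t : String) : Bool :=
  match lc, t.toList.head? with
  | some p, some n => pvAsciiAlnum p && pvAsciiAlnum n
  | _, _ => false

-- canonical suffix: what follows a string whose last char is lc
def pvS (lc : Option Char) : List String → String
  | [] => ""
  | t :: ts => (if pvBnd lc t then " " ++ t else t) ++ pvS t.toList.getLast? ts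

-- a string with nonempty char list is nonempty
theorem pvNeEmpty (s : String) (h : s.toList ≠ []) : s ≠ "" := by
  intro hh; rw [hh] at h; exact h rfl

-- endswith a single space means the last char is a space
theorem pvEndswithSpace (s : String) :
    PySem.Str.endswith s " " = true ↔ s.toList.getLast? = some ' ' := by
  show PySem.Chars.endswith s.toList (" ".toList) = true ↔ _
  rw [PySem.Chars.endswith_iff, List.getLast?_eq_some_iff]
  show [' '] <:+ s.toList ↔ _
  constructor
  · rintro ⟨pre, h⟩; exact ⟨pre, h.symm⟩
  · rintro ⟨pre, h⟩; exact ⟨pre, h.symm⟩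

theorem pvAsciiAlnum_ne_space {c : Char} (h : pvAsciiAlnum c = true) : c ≠ ' ' := by
  rintro rfl; revert h; decide

-- A's guard equals the canonical boundary decision
theorem pvACond_eq (out t : String) (hout : out ≠ "") (ht : t ≠ "") :
    pvACond out t = pvBnd out.toList.getLast? t := by
  have hol : out.toList ≠ [] := by simp [String.toList_eq_nil_iff, hout]
  have htl : t.toList ≠ [] := by simp [String.toList_eq_nil_iff, ht]
  obtain ⟨p, hp⟩ : ∃ p, out.toList.getLast? = some p :=
    Option.isSome_iff_exists.mp (by simp [List.getLast?_isSome, hol])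
  obtain ⟨n, l, hnl⟩ : ∃ n l, t.toList = n :: l := by
    cases h : t.toList with
    | nil => exact absurd h htl
    | cons a l => exact ⟨a, l, rfl⟩
  have hn : t.toList[0]? = some n := by simp [hnl]
  have hhd : t.toList.head? = some n := by simp [hnl]
  have hA : PySem.Str.pyGet? out (-1) = some p := by
    simp [PySem.Str.pyGet?, PySem.Chars.pyGet?, PySem.List.pyGet?_neg_one, hp]
  have hN : PySem.Str.pyGet? t 0 = some n := by
    simp [PySem.Str.pyGet?, PySem.Chars.pyGet?, PySem.List.pyGet?_zero, hn]
  simp only [pvACond, pvBnd, hA, hN, hp, hhd]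
  by_cases hpa : pvAsciiAlnum p = true
  · have hew : PySem.Str.endswith out " " = false := by
      rw [Bool.eq_false_iff]
      intro hw
      have := (pvEndswithSpace out).mp hw
      rw [hp] at this
      exact pvAsciiAlnum_ne_space hpa (Option.some.inj this)
    simp only [hpa, Bool.true_and]
    rw [hew]
    simp
  · simp [Bool.eq_false_iff.mpr hpa]

-- "".join is concatenation
theorem pvJoin0 (xs : List String) :
    PySem.Str.join "" xs = String.ofList ((xs.map String.toList).flatten) := by
  simp [PySem.Str.join, PySem.Chars.join]
  congr 1
  induction xs with
  | nil => rfl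
  | cons x xs ih =>
    cases xs with
    | nil => simp [List.intercalate]
    | cons y ys => simp_all [List.intercalate]

theorem pvJoinCons (x : String) (l : List String) :
    PySem.Str.join "" (x :: l) = x ++ PySem.Str.join "" l := by
  simp [pvJoin0, String.ofList_append]

-- B's guard, when pieces ends in u, equals the canonical decision
theorem pvBCond_eq (t u : String) (pieces : List String)
    (hlast : pieces.getLast? = some u) :
    pvBCond t pieces = pvBnd t.toList.getLast? u := by
  have hP : PySem.List.pyGet? pieces (-1) = some u := by
    simp [PySem.List.pyGet?_neg_one, hlast]
  have hhd : PySem.Str.pyGet? u 0 = u.toList.head? := by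
    cases h : u.toList with
    | nil => simp [PySem.Str.pyGet?, PySem.Chars.pyGet?, PySem.List.pyGet?, PySem.List.pyIdx?, h]
    | cons a l => simp [PySem.Str.pyGet?, PySem.Chars.pyGet?, PySem.List.pyGet?, PySem.List.pyIdx?, h]
  have hA : PySem.Str.pyGet? t (-1) = t.toList.getLast? := by
    simp [PySem.Str.pyGet?, PySem.Chars.pyGet?, PySem.List.pyGet?_neg_one]
  simp only [pvBCond, hP, hA, hhd, pvBnd]

-- A's fold over parts equals the cleaned-list fold
theorem pvFoldCleaned (parts : List String) (out : String) :
    parts.foldl pvAStep out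
      = ((parts.map PySem.Str.strip).filter (fun t => t ≠ "")).foldl
          (fun out t => if out = "" then out ++ t
                        else (if pvACond out t then out ++ " " else out) ++ t) out := by
  induction parts generalizing out with
  | nil => rfl
  | cons p ps ih =>
    by_cases h : PySem.Str.strip p = "" <;> simp [pvAStep, h, ih]

-- A's cleaned fold from a nonempty out appends the canonical suffix
theorem pvAFold (cs : List String) (out : String)
    (hcs : ∀ t ∈ cs, t ≠ "") (hout : out ≠ "") :
    cs.foldl (fun out t => if out = "" then out ++ t
                           else (if pvACond out t then out ++ " " else out) ++ t) out
      = out ++ pvS out.toList.getLast? cs := by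
  induction cs generalizing out with
  | nil => simp [pvS]
  | cons t ts ih =>
    have ht : t ≠ "" := hcs t (List.mem_cons_self ..)
    have hts : ∀ u ∈ ts, u ≠ "" := fun u hu => hcs u (List.mem_cons_of_mem _ hu)
    have htl : t.toList ≠ [] := by simp [String.toList_eq_nil_iff, ht]
    simp only [List.foldl_cons, if_neg hout, pvACond_eq out t hout ht]
    by_cases hb : pvBnd out.toList.getLast? t = true
    · rw [if_pos hb]
      have h1 : out ++ " " ++ t ≠ "" := pvNeEmpty _ (by simp)
      rw [ih (out ++ " " ++ t) hts h1]
      have h2 : (out ++ " " ++ t).toList.getLast? = t.toList.getLast? := by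
        have : (out ++ " " ++ t).toList = (out.toList ++ [' ']) ++ t.toList := by simp
        rw [this, List.getLast?_append_of_ne_nil _ htl]
      rw [h2, pvS, if_pos hb]
      simp [String.append_assoc]
    · rw [if_neg hb]
      have h1 : out ++ t ≠ "" := pvNeEmpty _ (by simp [htl])
      rw [ih (out ++ t) hts h1]
      have h2 : (out ++ t).toList.getLast? = t.toList.getLast? := by
        rw [String.toList_append, List.getLast?_append_of_ne_nil _ htl]
      rw [h2, pvS, if_neg hb]
      simp [String.append_assoc]
-- B's back-to-front fold: last piece is the head, and the joined reverse is head ++ canonical suffix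
theorem pvBFold (t : String) (ts : List String) (hcs : ∀ u ∈ t :: ts, u ≠ "") :
    ((t :: ts).foldr (fun t pieces => pvBStep pieces t) []).getLast? = some t
    ∧ PySem.Str.join "" (((t :: ts).foldr (fun t pieces => pvBStep pieces t) []).reverse)
        = t ++ pvS t.toList.getLast? ts := by
  induction ts generalizing t with
  | nil =>
    refine ⟨rfl, ?_⟩
    simp [pvBStep, pvBCond, PySem.List.pyGet?, PySem.List.pyIdx?, pvS,
      PySem.Str.join, PySem.Chars.join, List.intercalate]
  | cons u us ih =>
    have hts : ∀ v ∈ u :: us, v ≠ "" := fun v hv => hcs v (List.mem_cons_of_mem _ hv)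
    obtain ⟨ihl, ihj⟩ := ih u hts
    have hne : (u :: us).foldr (fun t pieces => pvBStep pieces t) [] ≠ [] := by
      intro h; rw [h] at ihl; simp at ihl
    have hgoal : (t :: u :: us).foldr (fun t pieces => pvBStep pieces t) []
               = pvBStep ((u :: us).foldr (fun t pieces => pvBStep pieces t) []) t := rfl
    rw [hgoal]
    generalize hR : (u :: us).foldr (fun t pieces => pvBStep pieces t) [] = rest at ihl ihj hne ⊢
    rw [pvBStep, pvBCond_eq t u rest ihl]
    constructor
    · by_cases hb : pvBnd t.toList.getLast? u = true <;> simp [hne, hb]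
    · by_cases hb : pvBnd t.toList.getLast? u = true
      · rw [if_pos (by simp [hne, hb])]
        have hrev : ((rest ++ [" "]) ++ [t]).reverse = t :: " " :: rest.reverse := by simp
        rw [hrev, pvJoinCons, pvJoinCons, ihj, pvS, if_pos hb]
        simp [String.append_assoc]
      · rw [if_neg (by simp [hb])]
        have hrev : (rest ++ [t]).reverse = t :: rest.reverse := by simp
        rw [hrev, pvJoinCons, ihj, pvS, if_neg hb]

-- ===== VERDICT (by name: the statement is the Claim_ definition above) =====
theorem join_segment_texts_py_spec : Claim_equal_join_segment_texts_py := by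
  intro parts _
  unfold Spec_join_segment_texts_py join_segment_texts_py join_segment_texts_py_alt
  rw [pvFoldCleaned, List.foldl_reverse]
  cases h : (parts.map PySem.Str.strip).filter (fun t => t ≠ "") with
  | nil =>
    simp [PySem.Str.join, PySem.Chars.join, List.intercalate]
  | cons c0 rest =>
    have hc0 : c0 ≠ "" := by
      have := List.of_mem_filter (a := c0) (l := parts.map PySem.Str.strip)
        (h ▸ List.mem_cons_self ..)
      simpa using this
    have hrest : ∀ t ∈ rest, t ≠ "" := by
      intro t ht
      have := List.of_mem_filter (a := t) (l := parts.map PySem.Str.strip)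
        (h ▸ List.mem_cons_of_mem c0 ht)
      simpa using this
    rw [(pvBFold c0 rest (by
      intro t ht
      rcases List.mem_cons.mp ht with rfl | ht'
      · exact hc0
      · exact hrest t ht')).2]
    simp only [List.foldl_cons, String.empty_append]
    rw [if_pos trivial]
    exact pvAFold rest c0 hrest hc0
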